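-- pv_equiv track=rewrite | github.com/rashevskyv/minishcap-json-editor | scripts/benchmark.py | calculate_string_width_before
-- ===== SOURCE A (Python) =====
-- from typing import Optional, List, Dict, Tuple
--
-- def calculate_string_width_before(text: str, font_map: dict,
--                                    default_char_width: int = 8,
--                                    icon_sequences: Optional[List[str]] = None) -> int:
--     total_width = 0
--     i = 0
--     text_len = len(text)
--
--     # Rebuild icon list every call (as current code does)
--     font_map_icons = [str(k) for k in font_map.keys() if len(str(k)) > 1]
--     if not icon_sequences:
--         icon_sequences = font_map_icons
--     else:
--         icon_sequences = list(set(icon_sequences + font_map_icons))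
--     sequences_to_use = sorted(icon_sequences, key=len, reverse=True)
--
--     while i < text_len:
--         matched_sequence = None
--         for seq in sequences_to_use:
--             if text.startswith(seq, i):
--                 matched_sequence = seq
--                 break
--
--         if matched_sequence:
--             total_width += font_map.get(matched_sequence, {}).get('width', default_char_width * len(matched_sequence))
--             i += len(matched_sequence)
--             continue
--
--         char = text[i]
--         if char == '[':
--             end_index = text.find(']', i)
--             if end_index != -1:
--                 i = end_index + 1
--                 continue
--         if char == '{':
--             end_index = text.find('}', i)
--             if end_index != -1:
--                 i = end_index + 1
--                 continue
--
--         char_info = font_map.get(char)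
--         if char_info is None:
--             total_width += default_char_width
--         else:
--             total_width += char_info.get('width', default_char_width)
--         i += 1
--
--     return total_width
-- ===== SOURCE B (Python) =====
-- def calculate_string_width_before(text, font_map, default_char_width=8, icon_sequences=None):
--     # One hash-set of all multi-char sequences plus a bound on their length;
--     # at each position probe only the slices text[i:i+L] (longest first),
--     # collecting per-token widths into a list that is summed at the end.
--     seqs = {k for k in font_map.keys() if len(str(k)) > 1}
--     if icon_sequences:
--         seqs.update(s for s in icon_sequences if s)
--     max_len = max(map(len, seqs), default=0)
--
--     n = len(text)
--     widths = []
--     i = 0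
--     while i < n:
--         hit = None
--         for L in range(min(max_len, n - i), 0, -1):
--             cand = text[i:i + L]
--             if cand in seqs:
--                 hit = cand
--                 break
--         if hit is not None:
--             widths.append(font_map.get(hit, {}).get('width', default_char_width * len(hit)))
--             i += len(hit)
--         else:
--             c = text[i]
--             j = -1
--             if c == '[':
--                 j = text.find(']', i)
--             elif c == '{':
--                 j = text.find('}', i)
--             if j != -1:
--                 i = j + 1
--             else:
--                 info = font_map.get(c)
--                 widths.append(default_char_width if info is None else info.get('width', default_char_width))
--                 i += 1
--     return sum(widths)
-- ===== Notes on version B (the rewrite author's own statement) =====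
-- stated objective: faster
-- what changed: Instead of sorting all sequences by length and running startswith over every sequence at every position, B keeps one hash set of sequences with their maximal length M, probes at each position only the slices text[i:i+L] for L = min(M, remaining)..1 by set membership (longest first, finding the same longest match), and collects per-token widths into a list summed at the end instead of a running total.
import Mathlib
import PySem

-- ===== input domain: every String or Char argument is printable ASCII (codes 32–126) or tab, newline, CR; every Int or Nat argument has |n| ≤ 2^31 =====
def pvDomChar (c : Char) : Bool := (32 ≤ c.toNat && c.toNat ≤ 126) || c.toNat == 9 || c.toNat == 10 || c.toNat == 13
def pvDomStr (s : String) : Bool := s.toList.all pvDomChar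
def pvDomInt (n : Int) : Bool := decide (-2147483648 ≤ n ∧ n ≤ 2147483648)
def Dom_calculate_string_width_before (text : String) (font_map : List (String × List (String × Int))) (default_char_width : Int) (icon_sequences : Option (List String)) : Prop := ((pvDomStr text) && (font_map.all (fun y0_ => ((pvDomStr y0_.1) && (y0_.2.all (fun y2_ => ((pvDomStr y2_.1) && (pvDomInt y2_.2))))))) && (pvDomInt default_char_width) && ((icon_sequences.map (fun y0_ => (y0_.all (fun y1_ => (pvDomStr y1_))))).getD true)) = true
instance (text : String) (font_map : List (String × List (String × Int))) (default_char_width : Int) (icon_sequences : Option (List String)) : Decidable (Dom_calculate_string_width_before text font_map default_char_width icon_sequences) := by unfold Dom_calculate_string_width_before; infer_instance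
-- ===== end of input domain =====

-- B replaces A's per-position scan over all length-sorted sequences by one hash set plus
-- longest-first bounded slice probes, collecting per-token widths into a list summed at
-- the end (objective: faster).


-- ===== PORT A =====
-- width of a matched icon sequence: font_map.get(seq, {}).get('width', dcw*len(seq))
def pvIconWidth (font_map : List (String × List (String × Int))) (dcw : Int) (s : String) : Int :=
  match PySem.Dict.get? (PySem.Dict.mk font_map) s with
  | none => dcw * (s.toList.length : Int)
  | some info => PySem.Dict.getD (PySem.Dict.mk info) "width" (dcw * (s.toList.length : Int))

-- A's unmatched-position branch ('[' / '{' skip, else char width); returns (new i, width added)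
def pvCharStep (font_map : List (String × List (String × Int))) (dcw : Int) (tl : List Char) (i : Nat) : Nat × Int :=
  match tl[i]? with
  | none => (i + 1, 0)    -- unreachable: only evaluated at i < tl.length
  | some c =>
    let skip : Int :=
      if c = '[' then PySem.Chars.findFrom tl [']'] (i : Int)
      else if c = '{' then PySem.Chars.findFrom tl ['}'] (i : Int)
      else -1
    if skip ≠ -1 then (skip.toNat + 1, 0)
    else
      match PySem.Dict.get? (PySem.Dict.mk font_map) (String.ofList [c]) with
      | none => (i + 1, dcw)
      | some info => (i + 1, PySem.Dict.getD (PySem.Dict.mk info) "width" dcw)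

-- A's 'while i < n: total += …' loop over a step returning (new i, width added);
-- the 'i < new i' guard only makes the recursion total (every step of A advances i)
def pvWidthLoop (step : Nat → Nat × Int) (n : Nat) (i : Nat) (total : Int) : Int :=
  if _h : i < n then
    if _h2 : i < (step i).1 then pvWidthLoop step n (step i).1 (total + (step i).2) else total
  else total
termination_by n - i
decreasing_by omega

-- A's loop body: first startswith match in the length-sorted sequence list
def pvStepA (font_map : List (String × List (String × Int))) (dcw : Int) (seqs : List String)
    (tl : List Char) (i : Nat) : Nat × Int :=
  match seqs.find? (fun s => PySem.Chars.startswith (tl.drop i) s.toList) with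
  | some s =>
    if s.toList ≠ [] then (i + s.toList.length, pvIconWidth font_map dcw s)   -- 'if matched_sequence:' ('' is falsy)
    else pvCharStep font_map dcw tl i
  | none => pvCharStep font_map dcw tl i

def calculate_string_width_before (text : String) (font_map : List (String × List (String × Int))) (default_char_width : Int) (icon_sequences : Option (List String)) : Int :=
  let tl := text.toList
  let font_map_icons := ((PySem.Dict.mk font_map).keys).filter (fun k => 1 < k.toList.length)
  let seqs : List String :=
    match icon_sequences with
    | none => font_map_icons
    | some l => if l = [] then font_map_icons else PySem.Set.ofList (l ++ font_map_icons)
  let sequences_to_use := PySem.List.sorted seqs (fun s => s.toList.length) true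
  pvWidthLoop (pvStepA font_map default_char_width sequences_to_use tl) tl.length 0 0

-- ===== PORT B =====
-- 'for L in range(top, 0, -1): if text[i:i+L] in seqs: hit = …' — longest-first slice probe
def pvProbe (seqSet : List String) (tl : List Char) (i : Nat) : Nat → Option String
  | 0 => none
  | Nat.succ L =>
    let cand := String.ofList ((tl.drop i).take (L + 1))
    if seqSet.contains cand then some cand else pvProbe seqSet tl i L

-- B's 'j = text.find(...)' value for the bracket-skip branch
def pvSkip (tl : List Char) (c : Char) (i : Nat) : Int :=
  if c = '[' then PySem.Chars.findFrom tl [']'] (i : Int)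
  else if c = '{' then PySem.Chars.findFrom tl ['}'] (i : Int)
  else -1

-- a returned probe hit is a nonempty prefix (cited by pvWidths' decreasing_by)
lemma pvProbe_pos (seqSet : List String) (tl : List Char) (i : Nat) (h : i < tl.length) :
    ∀ (top : Nat) (s : String), pvProbe seqSet tl i top = some s → 0 < s.toList.length := by
  intro top
  induction top with
  | zero => intro s hs; simp [pvProbe] at hs
  | succ L ih =>
    intro s hs
    simp only [pvProbe] at hs
    by_cases hc : seqSet.contains (String.ofList ((tl.drop i).take (L + 1))) = true
    · rw [if_pos hc] at hs
      obtain rfl := Option.some.inj hs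
      have hd : 0 < (tl.drop i).length := by rw [List.length_drop]; omega
      simp only [String.toList_ofList, List.length_take]
      omega
    · rw [if_neg hc] at hs; exact ih s hs

-- a successful find from i lands at an index ≥ i (cited by pvWidths' decreasing_by)
lemma pvSkip_adv (tl : List Char) (c : Char) (i : Nat) (h : i ≤ tl.length)
    (hj : pvSkip tl c i ≠ -1) : (i : Int) ≤ pvSkip tl c i := by
  unfold pvSkip at hj ⊢
  by_cases h1 : c = '['
  · rw [if_pos h1] at hj ⊢
    exact (PySem.Chars.findFrom_natCast_spec tl [']'] i h hj).1
  · rw [if_neg h1] at hj ⊢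
    by_cases h2 : c = '{'
    · rw [if_pos h2] at hj ⊢
      exact (PySem.Chars.findFrom_natCast_spec tl ['}'] i h hj).1
    · rw [if_neg h2] at hj; exact absurd rfl hj

-- B's main loop: the list of widths appended token by token ('widths' in Source B)
def pvWidths (font_map : List (String × List (String × Int))) (dcw : Int)
    (seqSet : List String) (maxLen : Nat) (tl : List Char) (i : Nat) : List Int :=
  if h : i < tl.length then
    match hp : pvProbe seqSet tl i (min maxLen (tl.length - i)) with
    | some hit =>
      (match PySem.Dict.get? (PySem.Dict.mk font_map) hit with
       | none => dcw * (hit.toList.length : Int)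
       | some info => PySem.Dict.getD (PySem.Dict.mk info) "width" (dcw * (hit.toList.length : Int)))
        :: pvWidths font_map dcw seqSet maxLen tl (i + hit.toList.length)
    | none =>
      let c := tl[i]'h
      if hj : pvSkip tl c i ≠ -1 then
        pvWidths font_map dcw seqSet maxLen tl ((pvSkip tl c i).toNat + 1)
      else
        (match PySem.Dict.get? (PySem.Dict.mk font_map) (String.ofList [c]) with
         | none => dcw
         | some info => PySem.Dict.getD (PySem.Dict.mk info) "width" dcw)
          :: pvWidths font_map dcw seqSet maxLen tl (i + 1)
  else []
termination_by tl.length - i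
decreasing_by
  · have := pvProbe_pos seqSet tl i h _ _ hp; omega
  · have h1 := pvSkip_adv tl (tl[i]'h) i (by omega) hj; omega
  · omega

def calculate_string_width_before_alt (text : String) (font_map : List (String × List (String × Int))) (default_char_width : Int) (icon_sequences : Option (List String)) : Int :=
  let tl := text.toList
  let seqs0 : PySem.Set String :=
    PySem.Set.ofList (((PySem.Dict.mk font_map).keys).filter (fun k => 1 < k.toList.length))
  let seqs : PySem.Set String :=
    match icon_sequences with
    | none => seqs0
    | some l => if l = [] then seqs0 else PySem.Set.update seqs0 (l.filter (fun s => s.toList ≠ []))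
  let max_len : Nat := (seqs.map (fun s => s.toList.length)).foldl max 0
  (pvWidths font_map default_char_width seqs max_len tl 0).sum

-- ===== PRECONDITION & SPEC =====
def Spec_calculate_string_width_before (text : String) (font_map : List (String × List (String × Int))) (default_char_width : Int) (icon_sequences : Option (List String)) (out : Int) : Prop := out = calculate_string_width_before_alt text font_map default_char_width icon_sequences
instance (text : String) (font_map : List (String × List (String × Int))) (default_char_width : Int) (icon_sequences : Option (List String)) (out : Int) : Decidable (Spec_calculate_string_width_before text font_map default_char_width icon_sequences out) := by unfold Spec_calculate_string_width_before; infer_instance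

-- ===== CLAIM (what is proved, stated in full; the proofs are below) =====
def Claim_equal_calculate_string_width_before : Prop := ∀ (text : String) (font_map : List (String × List (String × Int))) (default_char_width : Int) (icon_sequences : Option (List String)), Dom_calculate_string_width_before text font_map default_char_width icon_sequences → Spec_calculate_string_width_before text font_map default_char_width icon_sequences (calculate_string_width_before text font_map default_char_width icon_sequences)

-- ===== LEMMAS AND PROOFS =====

-- two prefixes of the same list with equal lengths coincide
lemma pvPrefix_eq_of_length_eq {p q x : List Char} (hp : p <+: x) (hq : q <+: x)
    (h : p.length = q.length) : p = q :=
  (List.prefix_of_prefix_length_le hp hq h.le).eq_of_length h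

-- what a successful longest-first slice probe returns: a member of seqSet, a prefix at i,
-- nonempty, and of maximal length among all members that are prefixes at i
lemma pvProbe_some (LB : List String) (tl : List Char) (i : Nat) :
    ∀ (top : Nat), top ≤ (tl.drop i).length →
    (∀ t ∈ LB, t.toList <+: tl.drop i → t.toList.length ≤ top) →
    ∀ s : String, pvProbe LB tl i top = some s →
    s ∈ LB ∧ s.toList <+: tl.drop i ∧ s.toList ≠ [] ∧
      ∀ t ∈ LB, t.toList <+: tl.drop i → t.toList.length ≤ s.toList.length := by
  intro top
  induction top with
  | zero => intro _ _ s h; simp [pvProbe] at h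
  | succ L ih =>
    intro htop hbound s h
    simp only [pvProbe] at h
    have hlen : ((tl.drop i).take (L + 1)).length = L + 1 := by
      rw [List.length_take]; omega
    by_cases hc : LB.contains (String.ofList ((tl.drop i).take (L + 1))) = true
    · rw [if_pos hc] at h
      obtain rfl := Option.some.inj h
      refine ⟨List.mem_of_elem_eq_true hc, ?_, ?_, ?_⟩
      · simpa [String.toList_ofList] using List.take_prefix (L + 1) (tl.drop i)
      · intro hnil; rw [String.toList_ofList, ← List.length_eq_zero_iff] at hnil; omega
      · intro t ht hpre
        have := hbound t ht hpre
        simpa [String.toList_ofList, hlen] using this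
    · rw [if_neg hc] at h
      have hbound' : ∀ t ∈ LB, t.toList <+: tl.drop i → t.toList.length ≤ L := by
        intro t ht hpre
        have h1 := hbound t ht hpre
        rcases Nat.lt_or_ge t.toList.length (L + 1) with h2 | h2
        · omega
        · exfalso
          have hl : t.toList.length = L + 1 := by omega
          have : t.toList = (tl.drop i).take (L + 1) := by
            have := List.prefix_iff_eq_take.mp hpre
            rw [this, hl]
          have ht' : t = String.ofList ((tl.drop i).take (L + 1)) := by
            apply String.toList_inj.mp; simpa [String.toList_ofList] using this
          rw [ht'] at ht
          exact hc (List.elem_eq_true_of_mem ht)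
      exact ih (by omega) hbound' s h

lemma pvProbe_none (LB : List String) (tl : List Char) (i : Nat) :
    ∀ (top : Nat), top ≤ (tl.drop i).length →
    (∀ t ∈ LB, t.toList <+: tl.drop i → t.toList.length ≤ top) →
    pvProbe LB tl i top = none →
    ∀ t ∈ LB, t.toList ≠ [] → ¬ t.toList <+: tl.drop i := by
  intro top
  induction top with
  | zero =>
    intro _ hbound _ t ht hne hpre
    have := hbound t ht hpre
    have : t.toList.length = 0 := by omega
    exact hne (List.length_eq_zero_iff.mp this)
  | succ L ih =>
    intro htop hbound h
    simp only [pvProbe] at h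
    by_cases hc : LB.contains (String.ofList ((tl.drop i).take (L + 1))) = true
    · rw [if_pos hc] at h; exact absurd h (by simp)
    · rw [if_neg hc] at h
      have hbound' : ∀ t ∈ LB, t.toList <+: tl.drop i → t.toList.length ≤ L := by
        intro t ht hpre
        have h1 := hbound t ht hpre
        rcases Nat.lt_or_ge t.toList.length (L + 1) with h2 | h2
        · omega
        · exfalso
          have hlen : ((tl.drop i).take (L + 1)).length = L + 1 := by
            rw [List.length_take]; omega
          have hl : t.toList.length = L + 1 := by omega
          have : t.toList = (tl.drop i).take (L + 1) := by
            have := List.prefix_iff_eq_take.mp hpre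
            rw [this, hl]
          have ht' : t = String.ofList ((tl.drop i).take (L + 1)) := by
            apply String.toList_inj.mp; simpa [String.toList_ofList] using this
          rw [ht'] at ht
          exact hc (List.elem_eq_true_of_mem ht)
      exact ih (by omega) hbound' h

-- A's find? over the descending-length sorted list returns exactly the maximal prefix match
lemma pvFind?_sorted (tl : List Char) (i : Nat) :
    ∀ (LA : List String),
    LA.Pairwise (fun a b => b.toList.length ≤ a.toList.length) →
    ∀ s : String, s ∈ LA → s.toList <+: tl.drop i → s.toList ≠ [] →
    (∀ t ∈ LA, t.toList <+: tl.drop i → t.toList.length ≤ s.toList.length) →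
    LA.find? (fun t => PySem.Chars.startswith (tl.drop i) t.toList) = some s := by
  intro LA
  induction LA with
  | nil => intro _ s hs; cases hs
  | cons a l ih =>
    intro hpw s hs hpre hne hmax
    rcases List.pairwise_cons.mp hpw with ⟨hhead, htail⟩
    by_cases ha : PySem.Chars.startswith (tl.drop i) a.toList = true
    · have hfc : List.find? (fun t => PySem.Chars.startswith (tl.drop i) t.toList) (a :: l)
          = some a := List.find?_cons_of_pos ha
      rw [hfc]
      have hapref := (PySem.Chars.startswith_iff _ _).mp ha
      have h1 : a.toList.length ≤ s.toList.length := hmax a (List.mem_cons_self) hapref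
      rcases List.mem_cons.mp hs with rfl | hsl
      · rfl
      · have h2 : s.toList.length ≤ a.toList.length := hhead s hsl
        have : a.toList = s.toList := pvPrefix_eq_of_length_eq hapref hpre (by omega)
        rw [String.toList_inj.mp this]
    · have hfc : List.find? (fun t => PySem.Chars.startswith (tl.drop i) t.toList) (a :: l)
          = List.find? (fun t => PySem.Chars.startswith (tl.drop i) t.toList) l :=
        List.find?_cons_of_neg ha
      rw [hfc]
      have hne' : s ≠ a := by
        rintro rfl
        exact ha ((PySem.Chars.startswith_iff _ _).mpr hpre)
      have hsl : s ∈ l := by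
        rcases List.mem_cons.mp hs with rfl | h; · exact absurd rfl hne'
        · exact h
      exact ih htail s hsl hpre hne
        (fun t ht hp => hmax t (List.mem_cons_of_mem a ht) hp)

-- one step of A advances i and adds exactly what B's width list contributes there
lemma pvCorr (font_map : List (String × List (String × Int))) (dcw : Int)
    (LA LB : List String) (maxLen : Nat) (tl : List Char)
    (hpw : LA.Pairwise (fun a b => b.toList.length ≤ a.toList.length))
    (hmem : ∀ s : String, (s ∈ LA ∧ s.toList ≠ []) ↔ s ∈ LB)
    (hmax : ∀ s ∈ LB, s.toList.length ≤ maxLen)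
    (i : Nat) (h : i < tl.length) :
    i < (pvStepA font_map dcw LA tl i).1 ∧
    (pvWidths font_map dcw LB maxLen tl i).sum
      = (pvStepA font_map dcw LA tl i).2
        + (pvWidths font_map dcw LB maxLen tl (pvStepA font_map dcw LA tl i).1).sum := by
  have hdrop : (tl.drop i).length = tl.length - i := List.length_drop
  have htop : min maxLen (tl.length - i) ≤ (tl.drop i).length := by omega
  have hbound : ∀ t ∈ LB, t.toList <+: tl.drop i →
      t.toList.length ≤ min maxLen (tl.length - i) := by
    intro t ht hpre
    have h1 := hmax t ht
    have h2 : t.toList.length ≤ (tl.drop i).length := hpre.length_le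
    omega
  rw [pvWidths.eq_def, dif_pos h]
  unfold pvStepA
  cases hfl : pvProbe LB tl i (min maxLen (tl.length - i)) with
  | some s =>
    obtain ⟨hsLB, hspre, hsne, hsmaxB⟩ := pvProbe_some LB tl i _ htop hbound s hfl
    obtain ⟨hsLA, _⟩ := (hmem s).mpr hsLB
    have hsmaxA : ∀ t ∈ LA, t.toList <+: tl.drop i → t.toList.length ≤ s.toList.length := by
      intro t ht hpre
      by_cases hte : t.toList = []
      · rw [hte]; simp
      · exact hsmaxB t ((hmem t).mp ⟨ht, hte⟩) hpre
    rw [pvFind?_sorted tl i LA hpw s hsLA hspre hsne hsmaxA]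
    dsimp only
    rw [if_pos hsne]
    have hpos : 0 < s.toList.length := by
      cases hsl : s.toList with
      | nil => exact absurd hsl hsne
      | cons a l => simp
    refine ⟨by omega, ?_⟩
    rw [List.sum_cons]
    unfold pvIconWidth
    rfl
  | none =>
    have hnone := pvProbe_none LB tl i _ htop hbound hfl
    have hchar : tl[i]? = some (tl[i]'h) := List.getElem?_eq_getElem h
    have hstep : (match LA.find? (fun t => PySem.Chars.startswith (tl.drop i) t.toList) with
        | some s => if s.toList ≠ [] then (i + s.toList.length, pvIconWidth font_map dcw s)
                    else pvCharStep font_map dcw tl i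
        | none => pvCharStep font_map dcw tl i) = pvCharStep font_map dcw tl i := by
      cases hfa : LA.find? (fun t => PySem.Chars.startswith (tl.drop i) t.toList) with
      | none => rfl
      | some t =>
        have htLA : t ∈ LA := List.mem_of_find?_eq_some hfa
        have htpre : t.toList <+: tl.drop i :=
          (PySem.Chars.startswith_iff _ _).mp (List.find?_eq_some_iff_getElem.mp hfa).1
        by_cases hte : t.toList = []
        · dsimp only; rw [if_neg (fun hx => hx hte)]
        · exact absurd htpre (hnone t ((hmem t).mp ⟨htLA, hte⟩) hte)
    rw [hstep]
    unfold pvCharStep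
    rw [hchar]
    dsimp only
    by_cases hj : pvSkip tl (tl[i]'h) i ≠ -1
    · rw [dif_pos hj]
      have hskip : (if (tl[i]'h) = '[' then PySem.Chars.findFrom tl [']'] (i : Int)
          else if (tl[i]'h) = '{' then PySem.Chars.findFrom tl ['}'] (i : Int) else -1)
          = pvSkip tl (tl[i]'h) i := rfl
      rw [hskip, if_pos hj]
      have hadv := pvSkip_adv tl (tl[i]'h) i (by omega) hj
      refine ⟨?_, ?_⟩ <;> (dsimp only; omega)
    · rw [dif_neg hj]
      have hskip : (if (tl[i]'h) = '[' then PySem.Chars.findFrom tl [']'] (i : Int)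
          else if (tl[i]'h) = '{' then PySem.Chars.findFrom tl ['}'] (i : Int) else -1)
          = pvSkip tl (tl[i]'h) i := rfl
      rw [hskip, if_neg hj]
      refine ⟨by cases PySem.Dict.get? (PySem.Dict.mk font_map) (String.ofList [tl[i]'h]) <;>
        simp, ?_⟩
      rw [List.sum_cons]
      cases PySem.Dict.get? (PySem.Dict.mk font_map) (String.ofList [tl[i]'h]) <;> simp

-- A's running total equals the accumulator plus the sum of B's remaining width list
lemma pvLoopSum (font_map : List (String × List (String × Int))) (dcw : Int)
    (LA LB : List String) (maxLen : Nat) (tl : List Char)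
    (hpw : LA.Pairwise (fun a b => b.toList.length ≤ a.toList.length))
    (hmem : ∀ s : String, (s ∈ LA ∧ s.toList ≠ []) ↔ s ∈ LB)
    (hmax : ∀ s ∈ LB, s.toList.length ≤ maxLen)
    (i : Nat) (total : Int) :
    pvWidthLoop (pvStepA font_map dcw LA tl) tl.length i total
      = total + (pvWidths font_map dcw LB maxLen tl i).sum := by
  rw [pvWidthLoop]
  by_cases h : i < tl.length
  · obtain ⟨hadv, hsum⟩ := pvCorr font_map dcw LA LB maxLen tl hpw hmem hmax i h
    rw [dif_pos h, dif_pos hadv,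
      pvLoopSum font_map dcw LA LB maxLen tl hpw hmem hmax
        (pvStepA font_map dcw LA tl i).1
        (total + (pvStepA font_map dcw LA tl i).2), hsum]
    ring
  · rw [dif_neg h, pvWidths.eq_def, dif_neg h]
    simp
termination_by tl.length - i
decreasing_by omega

-- ===== VERDICT (by name: the statement is the Claim_ definition above) =====
theorem calculate_string_width_before_spec : Claim_equal_calculate_string_width_before := by
  intro text font_map dcw icon_sequences _
  unfold Spec_calculate_string_width_before
  unfold calculate_string_width_before calculate_string_width_before_alt
  simp only []
  set tl := text.toList
  set icons := ((PySem.Dict.mk font_map).keys).filter (fun k => 1 < k.toList.length) with hicons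
  have hicons_ne : ∀ s : String, s ∈ icons → s.toList ≠ [] := by
    intro s hs
    have := (List.mem_filter.mp hs).2
    intro h; rw [h] at this; simp at this
  have main : ∀ (LAraw : List String) (LB : List String),
      (∀ s : String, (s ∈ LAraw ∧ s.toList ≠ []) ↔ s ∈ LB) →
      pvWidthLoop (pvStepA font_map dcw (PySem.List.sorted LAraw (fun s => s.toList.length) true) tl) tl.length 0 0
        = (pvWidths font_map dcw LB ((LB.map (fun s => s.toList.length)).foldl max 0) tl 0).sum := by
    intro LAraw LB hmemraw
    have hpw := PySem.List.sorted_pairwise_rev LAraw (fun s => s.toList.length)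
    have hmem : ∀ s : String,
        (s ∈ PySem.List.sorted LAraw (fun s => s.toList.length) true ∧ s.toList ≠ []) ↔ s ∈ LB := by
      intro s
      rw [PySem.List.mem_sorted]
      exact hmemraw s
    have hmax : ∀ s ∈ LB, s.toList.length ≤ (LB.map (fun s => s.toList.length)).foldl max 0 := by
      intro s hs
      exact (PySem.List.le_foldl_max (LB.map (fun s => s.toList.length)) 0).2 _
        (List.mem_map.mpr ⟨s, hs, rfl⟩)
    rw [pvLoopSum font_map dcw _ LB _ tl hpw hmem hmax 0 0]
    ring
  cases icon_sequences with
  | none =>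
    dsimp only
    exact main icons (PySem.Set.ofList icons)
      (fun s => by rw [PySem.Set.mem_ofList]
                   exact ⟨fun h => h.1, fun h => ⟨h, hicons_ne s h⟩⟩)
  | some l =>
    dsimp only
    by_cases hl : l = []
    · rw [if_pos hl, if_pos hl]
      exact main icons (PySem.Set.ofList icons)
        (fun s => by rw [PySem.Set.mem_ofList]
                     exact ⟨fun h => h.1, fun h => ⟨h, hicons_ne s h⟩⟩)
    · rw [if_neg hl, if_neg hl]
      apply main
      intro s
      constructor
      · rintro ⟨h1, h2⟩
        rcases List.mem_append.mp ((PySem.Set.mem_ofList _ _).mp h1) with h1' | h1'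
        · exact (PySem.Set.mem_update _ _ _).mpr
            (Or.inr (List.mem_filter.mpr ⟨h1', by simpa using h2⟩))
        · exact (PySem.Set.mem_update _ _ _).mpr
            (Or.inl ((PySem.Set.mem_ofList _ _).mpr h1'))
      · intro h
        rcases (PySem.Set.mem_update _ _ _).mp h with h' | h'
        · have h2 := (PySem.Set.mem_ofList _ _).mp h'
          exact ⟨(PySem.Set.mem_ofList _ _).mpr (List.mem_append.mpr (Or.inr h2)),
            hicons_ne s h2⟩
        · rcases List.mem_filter.mp h' with ⟨h1, h2⟩
          exact ⟨(PySem.Set.mem_ofList _ _).mpr (List.mem_append.mpr (Or.inl h1)),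
            by simpa using h2⟩
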